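-- pv_equiv track=rewrite | github.com/coumarane/rag-saas | backend/app/ingestion/chunker.py | _split_by_separator
-- ===== SOURCE A (Python) =====
-- def _split_by_separator(text: str, separator: str) -> list[str]:
--     """Split *text* on *separator*, keeping the separator at the end of each
--     chunk except the last (so sentences aren't fragmented)."""
--     if separator == " ":
--         return text.split(separator)
--     parts = text.split(separator)
--     # Re-attach separator to each part except the last.
--     result: list[str] = []
--     for i, part in enumerate(parts):
--         if i < len(parts) - 1:
--             result.append(part + separator)
--         else:
--             if part:
--                 result.append(part)
--     return [p for p in result if p]
-- ===== SOURCE B (Python) =====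
-- def _split_by_separator(text: str, separator: str) -> list[str]:
--     """Split *text* on *separator*, keeping the separator at the end of each
--     chunk except the last — one pass of str.find + slicing, no re-attach loop."""
--     if separator == " ":
--         return text.split(separator)
--     if not separator:
--         raise ValueError("empty separator")
--     chunks: list[str] = []
--     while True:
--         idx = text.find(separator)
--         if idx == -1:
--             break
--         end = idx + len(separator)
--         chunks.append(text[:end])
--         text = text[end:]
--     if text:
--         chunks.append(text)
--     return chunks
-- ===== Notes on version B (the rewrite author's own statement) =====
-- stated objective: simpler
-- what changed: Replaces split-then-enumerate-and-reattach (plus a final filter pass) by a single str.find loop that slices each chunk off with the separator already attached.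
import Mathlib
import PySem

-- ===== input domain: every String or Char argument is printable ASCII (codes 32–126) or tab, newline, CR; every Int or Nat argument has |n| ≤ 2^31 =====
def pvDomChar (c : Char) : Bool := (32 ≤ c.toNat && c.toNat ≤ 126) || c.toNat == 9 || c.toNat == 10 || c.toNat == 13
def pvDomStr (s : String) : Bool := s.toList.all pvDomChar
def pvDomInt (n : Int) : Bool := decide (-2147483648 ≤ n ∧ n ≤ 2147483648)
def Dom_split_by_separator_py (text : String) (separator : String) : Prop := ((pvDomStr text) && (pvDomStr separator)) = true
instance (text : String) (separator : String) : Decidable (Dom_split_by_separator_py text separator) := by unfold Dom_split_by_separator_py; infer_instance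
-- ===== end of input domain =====

-- B replaces A's split/enumerate/re-attach/filter passes by one str.find loop that slices each
-- chunk off with the separator already attached (objective: simpler; same return values).


-- ===== PORT A =====
-- Literal port of A (on `List Char` via the PySem.Chars primitives):
--   parts = text.split(separator); re-attach separator to all but the last part via the
--   enumerate loop; final `[p for p in result if p]` filter.
def split_by_separator_py (text : String) (separator : String) : List String :=
  if separator = " " then (PySem.Chars.splitOn text.toList separator.toList).map String.mk
  else if separator.toList = [] then []   -- ValueError (empty separator); excluded by Pre_
  else
    let sep := separator.toList
    let parts := PySem.Chars.splitOn text.toList sep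
    let result := (PySem.List.enumerate parts).foldl
      (fun res p =>
        if p.1 < (parts.length : Int) - 1 then res ++ [p.2 ++ sep]
        else if p.2 ≠ [] then res ++ [p.2] else res) []
    (result.filter (fun p => p ≠ [])).map String.mk

-- ===== PORT B =====
-- B's while loop: idx = text.find(separator); chunk = text[:idx+len(separator)];
-- text = text[idx+len(separator):]; after the loop, append the nonempty remainder.
def bgoB (sep : List Char) (hsep : sep ≠ []) (s : List Char) : List (List Char) :=
  if hi : PySem.Chars.find s sep = -1 then (if s = [] then [] else [s])
  else
    let e : Nat := (PySem.Chars.find s sep).toNat + sep.length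
    PySem.List.slice s none (some (e : Int)) ::
      bgoB sep hsep (PySem.List.slice s (some (e : Int)) none)
termination_by s.length
decreasing_by
  have h0 : 0 ≤ PySem.Chars.find s sep := by
    have := PySem.Chars.neg_one_le_find s sep; omega
  have hinf : sep <:+: s := (PySem.Chars.find_nonneg_iff s sep).mp h0
  have hs : s ≠ [] := by rintro rfl; exact hsep (List.infix_nil.mp hinf)
  have hm : 0 < sep.length := List.length_pos_iff.mpr hsep
  have hl : 0 < s.length := List.length_pos_iff.mpr hs
  simp only [PySem.List.slice_from_natCast, List.length_drop]
  omega

def split_by_separator_py_alt (text : String) (separator : String) : List String :=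
  if separator = " " then (PySem.Chars.splitOn text.toList separator.toList).map String.mk
  else if h : separator.toList = [] then []   -- B raises ValueError here; excluded by Pre_
  else (bgoB separator.toList h text.toList).map String.mk

-- ===== PRECONDITION & SPEC =====
-- Pre_ excludes only the empty separator, on which both Pythons raise ValueError.
def Pre_split_by_separator_py (text : String) (separator : String) : Prop := separator ≠ ""
instance (text : String) (separator : String) : Decidable (Pre_split_by_separator_py text separator) := by unfold Pre_split_by_separator_py; infer_instance
def pvWitness_split_by_separator_py : String × String := ("a. b. c", ". ")

def Spec_split_by_separator_py (text : String) (separator : String) (out : List String) : Prop := out = split_by_separator_py_alt text separator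
instance (text : String) (separator : String) (out : List String) : Decidable (Spec_split_by_separator_py text separator out) := by unfold Spec_split_by_separator_py; infer_instance

-- ===== CLAIM (what is proved, stated in full; the proofs are below) =====
def Claim_equal_split_by_separator_py : Prop := ∀ (text : String) (separator : String), Dom_split_by_separator_py text separator → Pre_split_by_separator_py text separator → Spec_split_by_separator_py text separator (split_by_separator_py text separator)

-- ===== LEMMAS AND PROOFS =====

-- Reference splitter: `msplit sep pre s` = the pieces text.split(sep) produces while scanning
-- `s`, `pre` being the characters of the current piece already passed.
def msplit (sep pre : List Char) : List Char → List (List Char)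
  | [] => [pre]
  | c :: rest =>
    if sep.isPrefixOf (c :: rest) then pre :: msplit sep [] (rest.drop (sep.length - 1))
    else msplit sep (pre ++ [c]) rest
termination_by s => s.length
decreasing_by
  all_goals simp

theorem msplit_ne_nil (sep pre s : List Char) : msplit sep pre s ≠ [] := by
  induction pre, s using msplit.induct sep with
  | case1 => simp [msplit]
  | case2 pre c rest hp ih => simp [msplit, hp]
  | case3 pre c rest hp ih => simpa [msplit, hp] using ih

theorem drop_len_cons (sep : List Char) (hsep : sep ≠ []) (c : Char) (rest : List Char) :
    List.drop sep.length (c :: rest) = rest.drop (sep.length - 1) := by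
  cases hm : sep.length with
  | zero => exact absurd (List.length_eq_zero_iff.mp hm) hsep
  | succ m' => simp [List.drop_succ_cons]

theorem splitOn_go_eq (sep : List Char) (hsep : sep ≠ []) (fuel : Nat) :
    ∀ (l cur : List Char) (racc : List (List Char)), l.length < fuel →
      PySem.Chars.splitOn.go sep fuel l cur racc = racc.reverse ++ msplit sep cur.reverse l := by
  induction fuel with
  | zero => intro l cur racc h; omega
  | succ fuel ih =>
    intro l cur racc h
    cases l with
    | nil => rw [PySem.Chars.splitOn.go.eq_def]; simp [msplit]
    | cons c rest =>
      rw [PySem.Chars.splitOn.go.eq_def]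
      by_cases hp : sep.isPrefixOf (c :: rest)
      · simp only [hp, if_true]
        have hm : 0 < sep.length := List.length_pos_iff.mpr hsep
        rw [ih _ _ _ (by simp at h ⊢; omega)]
        rw [drop_len_cons sep hsep]
        simp [msplit, hp]
      · simp only [hp, if_false]
        rw [ih rest (c :: cur) racc (by simp at h ⊢; omega)]
        simp [msplit, hp]

theorem splitOn_eq_msplit (s sep : List Char) (hsep : sep ≠ []) :
    PySem.Chars.splitOn s sep = msplit sep [] s := by
  unfold PySem.Chars.splitOn
  rw [splitOn_go_eq sep hsep _ s [] [] (by omega)]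
  simp

-- `find` is determined by "first position carrying sep as a prefix".
theorem find_eq_of (s sub : List Char) (j : Nat) (hj : sub <+: s.drop j)
    (hmin : ∀ i < j, ¬ sub <+: s.drop i) : PySem.Chars.find s sub = j := by
  have hinf : sub <:+: s := hj.isInfix.trans (s.drop_suffix j).isInfix
  have h0 : 0 ≤ PySem.Chars.find s sub := (PySem.Chars.find_nonneg_iff s sub).mpr hinf
  obtain ⟨hpre, hm⟩ := PySem.Chars.find_spec h0
  rcases lt_trichotomy (PySem.Chars.find s sub).toNat j with h | h | h
  · exact absurd hpre (hmin _ h)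
  · omega
  · exact absurd hj (hm j h)

-- msplit in terms of the FIRST occurrence, as `find` reports it.
theorem msplit_find (sep : List Char) (hsep : sep ≠ []) (pre s : List Char) :
    msplit sep pre s =
      if 0 ≤ PySem.Chars.find s sep then
        (pre ++ s.take (PySem.Chars.find s sep).toNat) ::
          msplit sep [] (s.drop ((PySem.Chars.find s sep).toNat + sep.length))
      else [pre ++ s] := by
  induction pre, s using msplit.induct sep with
  | case1 pre =>
    have hf : PySem.Chars.find [] sep = -1 :=
      (PySem.Chars.find_eq_neg_one_iff [] sep).mpr (fun h => hsep (List.infix_nil.mp h))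
    simp [msplit, hf]
  | case2 pre c rest hp ih =>
    have hpre : sep <+: (c :: rest) := List.isPrefixOf_iff_prefix.mp hp
    have hf : PySem.Chars.find (c :: rest) sep = ((0 : Nat) : Int) :=
      find_eq_of _ _ 0 (by simpa using hpre) (by intro i hi; omega)
    rw [hf]
    simp only [Int.toNat_natCast, List.take_zero, List.append_nil, List.drop_zero]
    rw [if_pos (by omega)]
    rw [show (0 + sep.length) = sep.length from by omega, drop_len_cons sep hsep]
    simp [msplit, hp]
  | case3 pre c rest hp ih =>
    have hnp : ¬ sep <+: (c :: rest) := fun h => hp (List.isPrefixOf_iff_prefix.mpr h)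
    rw [show msplit sep pre (c :: rest) = msplit sep (pre ++ [c]) rest from by simp [msplit, hp]]
    rw [ih]
    by_cases hr : 0 ≤ PySem.Chars.find rest sep
    · obtain ⟨hspre, hsm⟩ := PySem.Chars.find_spec (s := rest) (sub := sep) hr
      set k := (PySem.Chars.find rest sep).toNat with hk
      have hf : PySem.Chars.find (c :: rest) sep = ((k + 1 : Nat) : Int) := by
        refine find_eq_of _ _ (k + 1) (by simpa [List.drop_succ_cons] using hspre) ?_
        intro i hi
        cases i with
        | zero => simpa using hnp
        | succ i' => simpa [List.drop_succ_cons] using hsm i' (by omega)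
      rw [hf, if_pos hr, if_pos (by omega)]
      simp only [Int.toNat_natCast, List.take_succ_cons]
      rw [show (k + 1 + sep.length) = (k + sep.length) + 1 from by omega, List.drop_succ_cons]
      simp
    · have hfr : PySem.Chars.find rest sep = -1 := by
        have := PySem.Chars.neg_one_le_find rest sep; omega
      have hnir : ¬ sep <:+: rest := (PySem.Chars.find_eq_neg_one_iff _ _).mp hfr
      have hni : ¬ sep <:+: (c :: rest) := by
        rw [List.infix_cons_iff]; push_neg; exact ⟨hnp, hnir⟩
      have hf : PySem.Chars.find (c :: rest) sep = -1 :=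
        (PySem.Chars.find_eq_neg_one_iff _ _).mpr hni
      rw [if_neg hr, hf, if_neg (by omega)]
      simp

-- A's enumerate loop, characterised: separator onto every part but the last,
-- the last part kept only when nonempty.
def attach (sep : List Char) : List (List Char) → List (List Char)
  | [] => []
  | [p] => if p = [] then [] else [p]
  | p :: q :: ps => (p ++ sep) :: attach sep (q :: ps)

theorem fold_eq_attach (sep : List Char) (ps : List (List Char)) :
    ∀ (n L : Int) (res : List (List Char)), L = n + ps.length →
      (PySem.List.enumerate ps n).foldl
        (fun res p =>
          if p.1 < L - 1 then res ++ [p.2 ++ sep]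
          else if p.2 ≠ [] then res ++ [p.2] else res) res
      = res ++ attach sep ps := by
  induction ps with
  | nil => intro n L res hL; simp [PySem.List.enumerate, attach]
  | cons p ps ih =>
    intro n L res hL
    rw [show PySem.List.enumerate (p :: ps) n = (n, p) :: PySem.List.enumerate ps (n + 1) from rfl]
    rw [List.foldl_cons]
    cases ps with
    | nil =>
      simp only [List.length_cons, List.length_nil] at hL
      have hc : ¬ (n < L - 1) := by omega
      simp only [hc, if_false]
      rw [show PySem.List.enumerate ([] : List (List Char)) (n + 1) = [] from rfl]
      rw [List.foldl_nil]
      by_cases hp : p = []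
      · simp [attach, hp]
      · simp [attach, hp]
    | cons q ps' =>
      have hc : n < L - 1 := by
        simp only [List.length_cons] at hL; push_cast at hL; omega
      simp only [hc, if_true]
      rw [ih (n + 1) L (res ++ [p ++ sep])
        (by simp only [List.length_cons] at hL ⊢; push_cast at hL ⊢; omega)]
      simp [attach]

theorem mem_attach_ne_nil (sep : List Char) (hsep : sep ≠ []) :
    ∀ (ps : List (List Char)) (x : List Char), x ∈ attach sep ps → x ≠ [] := by
  intro ps
  induction ps using attach.induct with
  | case1 => simp [attach]
  | case2 => simp [attach]
  | case3 p hp =>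
    intro x hx
    simp [attach, hp] at hx
    simp [hx, hp]
  | case4 p q ps ih =>
    intro x hx
    rw [show attach sep (p :: q :: ps) = (p ++ sep) :: attach sep (q :: ps) from rfl] at hx
    rcases List.mem_cons.mp hx with h | h
    · subst h; simp [hsep]
    · exact ih x h

theorem take_add_of_prefix (s sep : List Char) (k : Nat) (hk : k ≤ s.length)
    (hpre : sep <+: s.drop k) : s.take (k + sep.length) = s.take k ++ sep := by
  obtain ⟨r, hr⟩ := hpre
  conv_lhs => rw [← List.take_append_drop k s, ← hr]
  rw [List.take_append]
  have h1 : List.take (k + sep.length) (List.take k s) = List.take k s := by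
    rw [List.take_take]; congr 1; omega
  have h2 : (List.take k s).length = k := by simp [hk]
  rw [h1, h2]
  rw [show k + sep.length - k = sep.length from by omega]
  rw [show List.take sep.length (sep ++ r) = sep from List.take_left]

theorem attach_cons_of_ne_nil (sep p : List Char) (rest : List (List Char)) (h : rest ≠ []) :
    attach sep (p :: rest) = (p ++ sep) :: attach sep rest := by
  cases rest with
  | nil => exact absurd rfl h
  | cons q ps => rfl

theorem attach_msplit (sep : List Char) (hsep : sep ≠ []) (s : List Char) :
    attach sep (msplit sep [] s) = bgoB sep hsep s := by
  induction s using bgoB.induct sep hsep with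
  | case1 hi =>
    simp [msplit, attach, bgoB, hi]
  | case2 x hi hx =>
    rw [msplit_find sep hsep [] x, if_neg (by simp [hi])]
    simp [bgoB, hi, attach, hx]
  | case3 s hi e ih =>
    have he : e = (PySem.Chars.find s sep).toNat + sep.length := rfl
    rw [PySem.List.slice_from_natCast, he] at ih
    have h0 : 0 ≤ PySem.Chars.find s sep := by
      have := PySem.Chars.neg_one_le_find s sep; omega
    have hk : (PySem.Chars.find s sep).toNat ≤ s.length := by
      have := PySem.Chars.find_le_length s sep; omega
    have hspre : sep <+: s.drop (PySem.Chars.find s sep).toNat :=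
      (PySem.Chars.find_spec h0).1
    rw [msplit_find sep hsep [] s, if_pos h0]
    rw [attach_cons_of_ne_nil _ _ _ (msplit_ne_nil _ _ _)]
    rw [ih]
    conv_rhs => rw [bgoB]
    rw [dif_neg hi]
    simp only [PySem.List.slice_to_natCast, PySem.List.slice_from_natCast]
    rw [take_add_of_prefix s sep _ hk hspre]
    simp

-- ===== VERDICT (by name: the statement is the Claim_ definition above) =====
theorem split_by_separator_py_spec : Claim_equal_split_by_separator_py := by
  intro text separator _dom pre
  unfold Spec_split_by_separator_py split_by_separator_py split_by_separator_py_alt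
  by_cases hsp : separator = " "
  · simp [hsp]
  · have hne : separator.toList ≠ [] := by
      simpa [String.toList_eq_nil_iff] using pre
    simp only [if_neg hsp, dif_neg hne, if_neg hne]
    rw [fold_eq_attach separator.toList _ 0 ((PySem.Chars.splitOn text.toList separator.toList).length : Int) [] (by simp)]
    rw [List.filter_eq_self.mpr]
    · rw [splitOn_eq_msplit _ _ hne, attach_msplit _ hne]
      simp
    · intro x hx
      simpa using mem_attach_ne_nil _ hne _ x hx
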